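-- pv_equiv track=rewrite | github.com/nsaikiran/MyPrograms | Python/interview-prep/subarrays-with-bit-OR-elements-present-in-it.py | count_valid_subarrays
-- ===== SOURCE A (Python) =====
-- def count_valid_subarrays(arr):
--     from collections import defaultdict
--
--     result = 0
--     prev = dict()  # OR value -> set of elements in contributing subarrays
--
--     for num in arr:
--         curr = defaultdict(set)
--
--         # Start new subarray with only this element
--         curr[num].add(num)
--
--         # Extend previous subarrays
--         for or_val, elements in prev.items():
--             new_or = or_val | num
--             curr[new_or].update(elements)
--             curr[new_or].add(num)
--
--         # Count valid subarrays
--         for or_val, elements in curr.items():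
--             if or_val in elements:
--                 result += 1
--
--         prev = curr
--
--     return result
-- ===== SOURCE B (Python) =====
-- def count_valid_subarrays(arr):
--     result = 0
--     prev = {}   # OR value -> smallest start index of a subarray with that OR ending at the current position
--     last = {}   # element value -> index of its most recent occurrence
--     for i, num in enumerate(arr):
--         curr = {num: i}
--         for v, s in prev.items():
--             nv = v | num
--             if nv not in curr or s < curr[nv]:
--                 curr[nv] = s
--         last[num] = i
--         for v, s in curr.items():
--             if v in last and last[v] >= s:
--                 result += 1
--         prev = curr
--     return result
-- ===== Notes on version B (the rewrite author's own statement) =====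
-- stated objective: faster
-- what changed: Instead of carrying, for every distinct OR value of subarrays ending at the current index, the set of all elements of those subarrays (unioned window by window), B carries only the minimal start index of each OR group plus a dict of every value's last occurrence, so A's set unions disappear and the 'OR value occurs among the elements' test becomes a single index comparison.
import Mathlib
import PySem

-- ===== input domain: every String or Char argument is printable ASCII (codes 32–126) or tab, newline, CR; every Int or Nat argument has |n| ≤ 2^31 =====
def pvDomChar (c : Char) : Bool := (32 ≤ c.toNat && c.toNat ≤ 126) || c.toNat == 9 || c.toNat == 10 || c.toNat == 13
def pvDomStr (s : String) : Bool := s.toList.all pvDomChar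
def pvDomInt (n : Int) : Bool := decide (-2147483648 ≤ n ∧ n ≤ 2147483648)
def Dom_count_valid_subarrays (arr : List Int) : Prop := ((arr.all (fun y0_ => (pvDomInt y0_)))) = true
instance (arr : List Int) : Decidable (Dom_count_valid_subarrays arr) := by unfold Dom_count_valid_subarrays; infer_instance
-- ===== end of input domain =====

-- B replaces A's per-OR element sets by the minimal start index of each distinct OR plus a
-- last-occurrence index, so "is the OR value an element?" becomes an index comparison; measured faster.

-- ===== PORT A =====
-- loop bodies of A, as named helpers (inner extension loop, counting loop, outer loop)
def aInner (num : Int) (c : PySem.Dict Int (PySem.Set Int)) (p : Int × PySem.Set Int) :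
    PySem.Dict Int (PySem.Set Int) :=
  let new_or := PySem.Int.bor p.1 num
  c.insert new_or (PySem.Set.add (PySem.Set.update (c.getD new_or PySem.Set.empty) p.2) num)

def aCount (r : Int) (p : Int × PySem.Set Int) : Int :=
  if PySem.Set.contains p.2 p.1 then r + 1 else r

def aStep (st : Int × PySem.Dict Int (PySem.Set Int)) (num : Int) :
    Int × PySem.Dict Int (PySem.Set Int) :=
  let curr0 : PySem.Dict Int (PySem.Set Int) :=
    PySem.Dict.insert PySem.Dict.empty num (PySem.Set.add PySem.Set.empty num)
  let curr := st.2.items.foldl (aInner num) curr0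
  (curr.items.foldl aCount st.1, curr)

def count_valid_subarrays (arr : List Int) : Int :=
  (arr.foldl aStep (0, PySem.Dict.empty)).1

-- ===== PORT B =====
-- loop bodies of B (inner min-start loop, counting loop via the last-occurrence dict, outer loop)
def bInner (num : Int) (c : PySem.Dict Int Int) (q : Int × Int) : PySem.Dict Int Int :=
  let nv := PySem.Int.bor q.1 num
  if c.contains nv = false ∨ q.2 < c.getD nv 0 then c.insert nv q.2 else c

def bCount (last : PySem.Dict Int Int) (r : Int) (q : Int × Int) : Int :=
  if last.contains q.1 = true ∧ q.2 ≤ last.getD q.1 0 then r + 1 else r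

def bStep (st : Int × PySem.Dict Int Int × PySem.Dict Int Int) (p : Int × Int) :
    Int × PySem.Dict Int Int × PySem.Dict Int Int :=
  let curr0 : PySem.Dict Int Int := PySem.Dict.insert PySem.Dict.empty p.2 p.1
  let curr := st.2.1.items.foldl (bInner p.2) curr0
  let last := st.2.2.insert p.2 p.1
  (curr.items.foldl (bCount last) st.1, curr, last)

def count_valid_subarrays_alt (arr : List Int) : Int :=
  ((PySem.List.enumerate arr).foldl bStep (0, PySem.Dict.empty, PySem.Dict.empty)).1

-- ===== PRECONDITION & SPEC =====
def Spec_count_valid_subarrays (arr : List Int) (out : Int) : Prop := out = count_valid_subarrays_alt arr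
instance (arr : List Int) (out : Int) : Decidable (Spec_count_valid_subarrays arr out) := by unfold Spec_count_valid_subarrays; infer_instance

-- ===== CLAIM (what is proved, stated in full; the proofs are below) =====
def Claim_equal_count_valid_subarrays : Prop := ∀ (arr : List Int), Dom_count_valid_subarrays arr → Spec_count_valid_subarrays arr (count_valid_subarrays arr)

-- ===== LEMMAS AND PROOFS =====

-- relation between one A-dict entry (OR value, element set) and one B-dict entry (OR value, min
-- start): the set holds exactly the elements of the processed prefix `ys` from that start on.
def QRel (ys : List Int) (a : Int × PySem.Set Int) (b : Int × Int) : Prop :=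
  a.1 = b.1 ∧ ∃ m : Nat, b.2 = (m : Int) ∧ m < ys.length ∧ ∀ x : Int, x ∈ a.2 ↔ x ∈ ys.drop m

-- simulation relation between A's and B's OR-dicts
def RelD (ys : List Int) (dA : PySem.Dict Int (PySem.Set Int)) (dB : PySem.Dict Int Int) : Prop :=
  dA.keys.Nodup ∧ List.Forall₂ (QRel ys) dA.items dB.items

-- invariant of B's last-occurrence dict over the processed prefix `ys`
def LInv (ys : List Int) (last : PySem.Dict Int Int) : Prop :=
  (∀ v : Int, last.contains v = true → ∃ j : Nat, last.get? v = some (j : Int) ∧ j < ys.length) ∧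
  (∀ (v : Int) (m : Nat), m < ys.length →
    ((last.contains v = true ∧ (m : Int) ≤ last.getD v 0) ↔ v ∈ ys.drop m))

theorem mem_drop_of_le {α : Type} {p q : Nat} (l : List α) (h : p ≤ q) {x : α}
    (hx : x ∈ l.drop q) : x ∈ l.drop p := by
  have e : l.drop q = (l.drop p).drop (q - p) := by rw [List.drop_drop]; congr 1; omega
  rw [e] at hx
  exact List.drop_subset _ _ hx

theorem forall₂_map_fst {ys : List Int} {la : List (Int × PySem.Set Int)} {lb : List (Int × Int)}
    (h : List.Forall₂ (QRel ys) la lb) : la.map Prod.fst = lb.map Prod.fst := by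
  induction h with
  | nil => rfl
  | cons hq _ ih => simp [ih, hq.1]

theorem nodup_split_fst {β : Type} {l₁ l₂ : List (Int × β)} {k : Int} {v : β}
    (h : ((l₁ ++ (k, v) :: l₂).map Prod.fst).Nodup) :
    (∀ p ∈ l₁, p.1 ≠ k) ∧ (∀ p ∈ l₂, p.1 ≠ k) := by
  rw [List.map_append] at h
  constructor
  · intro p hp hpk
    exact (List.disjoint_of_nodup_append h) (List.mem_map.mpr ⟨p, hp, hpk⟩) (by simp)
  · intro p hp hpk
    have h2 := h.of_append_right
    simp only [List.map_cons, List.nodup_cons] at h2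
    exact h2.1 (List.mem_map.mpr ⟨p, hp, hpk⟩)

theorem items_insert_split {ν : Type} (c : PySem.Dict Int ν) {k : Int}
    {l₁ l₂ : List (Int × ν)} {v₀ : ν} (v : ν)
    (he : c.items = l₁ ++ (k, v₀) :: l₂) (hnod : c.keys.Nodup) (hc : c.contains k = true) :
    (c.insert k v).items = l₁ ++ (k, v) :: l₂ := by
  have hnodm : ((l₁ ++ (k, v₀) :: l₂).map Prod.fst).Nodup := by rw [← he]; exact hnod
  obtain ⟨h1, h2⟩ := nodup_split_fst hnodm
  rw [PySem.Dict.items_insert_of_contains _ _ hc, he, List.map_append, List.map_cons]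
  have e₁ : l₁.map (fun p => if (p.1 == k) = true then (k, v) else p) = l₁ := by
    rw [List.map_congr_left (g := id) (fun p hp => by simp [h1 p hp])]; exact List.map_id _
  have e₂ : l₂.map (fun p => if (p.1 == k) = true then (k, v) else p) = l₂ := by
    rw [List.map_congr_left (g := id) (fun p hp => by simp [h2 p hp])]; exact List.map_id _
  rw [e₁, e₂]
  simp

theorem forall₂_split {ys : List Int} {la : List (Int × PySem.Set Int)} {lb : List (Int × Int)}
    (h : List.Forall₂ (QRel ys) la lb) :
    ∀ {k : Int}, k ∈ la.map Prod.fst →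
      ∃ la₁ S₀ la₂ lb₁ b₀ lb₂,
        la = la₁ ++ (k, S₀) :: la₂ ∧ lb = lb₁ ++ (k, b₀) :: lb₂ ∧
        List.Forall₂ (QRel ys) la₁ lb₁ ∧ List.Forall₂ (QRel ys) la₂ lb₂ ∧
        QRel ys (k, S₀) (k, b₀) := by
  induction h with
  | nil => intro k hk; simp at hk
  | @cons a b l₁ l₂ hq hrest ih =>
    intro k hk
    rcases (by simpa using hk : k = a.1 ∨ k ∈ l₁.map Prod.fst) with h1 | h2
    · subst h1
      exact ⟨[], a.2, l₁, [], b.2, l₂, by simp, by simp [hq.1], List.Forall₂.nil, hrest,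
        ⟨rfl, hq.2⟩⟩
    · obtain ⟨la₁, S₀, la₂, lb₁, b₀, lb₂, e1, e2, f1, f2, q⟩ := ih h2
      exact ⟨a :: la₁, S₀, la₂, b :: lb₁, b₀, lb₂, by rw [e1]; rfl, by rw [e2]; rfl,
        List.Forall₂.cons hq f1, f2, q⟩

theorem relD_step {xs : List Int} {num : Int} {cA : PySem.Dict Int (PySem.Set Int)}
    {cB : PySem.Dict Int Int} (h : RelD (xs ++ [num]) cA cB)
    {a : Int × PySem.Set Int} {b : Int × Int} (hq : QRel xs a b) :
    RelD (xs ++ [num]) (aInner num cA a) (bInner num cB b) := by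
  obtain ⟨b1, b2⟩ := b
  obtain ⟨hab, m, hbm, hmlt, hmem⟩ := hq
  dsimp only at hab hbm
  subst hab; subst hbm
  obtain ⟨hnodA, hitems⟩ := h
  have hkeys : cA.keys = cB.keys := forall₂_map_fst hitems
  have hnodB : cB.keys.Nodup := hkeys ▸ hnodA
  have hyslen : (xs ++ [num]).length = xs.length + 1 := by simp
  simp only [aInner, bInner]
  set nv := PySem.Int.bor a.1 num with hnv
  have hcc : cA.contains nv = cB.contains nv := by
    rw [PySem.Dict.contains_eq_decide_mem_keys, PySem.Dict.contains_eq_decide_mem_keys, hkeys]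
  have hdropm : (xs ++ [num]).drop m = xs.drop m ++ [num] :=
    List.drop_append_of_le_length (le_of_lt hmlt)
  by_cases hc : cB.contains nv = true
  · -- key already present: in-place update on both sides
    have hcA : cA.contains nv = true := by rw [hcc]; exact hc
    have hkmem : nv ∈ cA.items.map Prod.fst := by
      have h' := PySem.Dict.contains_eq_decide_mem_keys cA nv
      rw [hcA] at h'
      exact of_decide_eq_true h'.symm
    obtain ⟨la₁, S₀, la₂, lb₁, b₀, lb₂, e1, e2, f1, f2, qmid⟩ := forall₂_split hitems hkmem
    obtain ⟨-, m₀, hb₀, hm₀lt, hmem₀⟩ := qmid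
    dsimp only at hb₀ hmem₀
    subst hb₀
    have hgA : cA.get? nv = some S₀ := PySem.Dict.get?_of_mem_items _ (by rw [e1]; simp) hnodA
    have hgB : cB.get? nv = some ((m₀ : Nat) : Int) :=
      PySem.Dict.get?_of_mem_items _ (by rw [e2]; simp) hnodB
    have hgDA : cA.getD nv PySem.Set.empty = S₀ := PySem.Dict.getD_of_get?_eq_some _ _ hgA
    have hgDB : cB.getD nv 0 = ((m₀ : Nat) : Int) := PySem.Dict.getD_of_get?_eq_some _ _ hgB
    have hiA : (cA.insert nv
          (PySem.Set.add (PySem.Set.update (cA.getD nv PySem.Set.empty) a.2) num)).items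
        = la₁ ++ (nv, PySem.Set.add (PySem.Set.update S₀ a.2) num) :: la₂ := by
      rw [hgDA]; exact items_insert_split cA _ e1 hnodA hcA
    have hnotfalse : ¬ (cB.contains nv = false) := by simp [hc]
    by_cases hbr : (cB.contains nv = false ∨ ((m : Nat) : Int) < cB.getD nv 0)
    · have hlt : m < m₀ := by
        rcases hbr with hf | hlt'
        · exact absurd hf hnotfalse
        · rw [hgDB] at hlt'; exact_mod_cast hlt'
      rw [if_pos hbr]
      have hmemNew : ∀ x : Int,
          x ∈ PySem.Set.add (PySem.Set.update S₀ a.2) num ↔ x ∈ (xs ++ [num]).drop m := by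
        intro x
        rw [PySem.Set.mem_add, PySem.Set.mem_update, hmem x, hdropm]
        constructor
        · rintro ((hS₀ | hxs) | hn)
          · have h' : x ∈ (xs ++ [num]).drop m :=
              mem_drop_of_le _ (le_of_lt hlt) ((hmem₀ x).mp hS₀)
            rw [hdropm] at h'
            exact h'
          · exact List.mem_append.mpr (Or.inl hxs)
          · simp [hn]
        · intro hx
          rcases List.mem_append.mp hx with h1 | h2
          · exact Or.inl (Or.inr h1)
          · simp at h2; exact Or.inr h2
      constructor
      · rw [PySem.Dict.keys_insert_of_contains _ _ hcA]; exact hnodA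
      · have hiB : (cB.insert nv ((m : Nat) : Int)).items = lb₁ ++ (nv, ((m : Nat) : Int)) :: lb₂ :=
          items_insert_split cB _ e2 hnodB hc
        rw [hiA, hiB]
        refine List.rel_append f1 (List.Forall₂.cons ⟨rfl, m, rfl, ?_, hmemNew⟩ f2)
        rw [hyslen]; omega
    · have hge : m₀ ≤ m := by
        push Not at hbr
        have h2' := hbr.2
        rw [hgDB] at h2'
        exact_mod_cast h2'
      rw [if_neg hbr]
      have hmemNew : ∀ x : Int,
          x ∈ PySem.Set.add (PySem.Set.update S₀ a.2) num ↔ x ∈ (xs ++ [num]).drop m₀ := by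
        intro x
        rw [PySem.Set.mem_add, PySem.Set.mem_update, hmem x]
        constructor
        · rintro ((hS₀ | hxs) | hn)
          · exact (hmem₀ x).mp hS₀
          · exact mem_drop_of_le _ hge (by rw [hdropm]; exact List.mem_append.mpr (Or.inl hxs))
          · exact mem_drop_of_le _ hge (by rw [hdropm]; simp [hn])
        · intro hx
          exact Or.inl (Or.inl ((hmem₀ x).mpr hx))
      constructor
      · rw [PySem.Dict.keys_insert_of_contains _ _ hcA]; exact hnodA
      · rw [hiA, e2]
        exact List.rel_append f1 (List.Forall₂.cons ⟨rfl, m₀, rfl, hm₀lt, hmemNew⟩ f2)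
  · -- fresh key: both append
    have hcB : cB.contains nv = false := by simpa using hc
    have hcA : cA.contains nv = false := by rw [hcc]; exact hcB
    have hgDA : cA.getD nv PySem.Set.empty = PySem.Set.empty :=
      PySem.Dict.getD_of_not_contains _ _ hcA
    rw [if_pos (Or.inl hcB)]
    have hnkm : nv ∉ cA.keys := by
      rw [PySem.Dict.contains_eq_decide_mem_keys] at hcA
      simpa using hcA
    constructor
    · rw [PySem.Dict.keys_insert_of_not_contains _ _ hcA, List.nodup_append]
      refine ⟨hnodA, by simp, ?_⟩
      intro x hx y hy
      simp only [List.mem_singleton] at hy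
      subst hy
      exact fun hxy => hnkm (hxy ▸ hx)
    · rw [PySem.Dict.items_insert_of_not_contains _ _ hcA,
        PySem.Dict.items_insert_of_not_contains _ _ hcB, hgDA]
      refine List.rel_append hitems (List.Forall₂.cons ⟨rfl, m, rfl, ?_, ?_⟩ List.Forall₂.nil)
      · rw [hyslen]; omega
      · intro x
        rw [PySem.Set.mem_add, PySem.Set.mem_update, hmem x, hdropm]
        constructor
        · rintro ((hS₀ | hxs) | hn)
          · simp [PySem.Set.empty] at hS₀
          · exact List.mem_append.mpr (Or.inl hxs)
          · simp [hn]
        · intro hx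
          rcases List.mem_append.mp hx with h1 | h2
          · exact Or.inl (Or.inr h1)
          · simp at h2; exact Or.inr h2

theorem inner_loop (xs : List Int) (num : Int) :
    ∀ (la : List (Int × PySem.Set Int)) (lb : List (Int × Int)),
      List.Forall₂ (QRel xs) la lb →
      ∀ cA cB, RelD (xs ++ [num]) cA cB →
        RelD (xs ++ [num]) (la.foldl (aInner num) cA) (lb.foldl (bInner num) cB) := by
  intro la lb h
  induction h with
  | nil => exact fun cA cB hr => hr
  | cons hq _ ih =>
    intro cA cB hr
    simp only [List.foldl_cons]
    exact ih _ _ (relD_step hr hq)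

theorem count_eq (ys : List Int) (last : PySem.Dict Int Int) (hL : LInv ys last) :
    ∀ (la : List (Int × PySem.Set Int)) (lb : List (Int × Int)),
      List.Forall₂ (QRel ys) la lb →
      ∀ r : Int, la.foldl aCount r = lb.foldl (bCount last) r := by
  intro la lb h
  induction h with
  | nil => intro r; rfl
  | @cons a b l₁ l₂ hq _ ih =>
    intro r
    simp only [List.foldl_cons]
    have hstep : aCount r a = bCount last r b := by
      obtain ⟨hab, m, hbm, hmlt, hmem⟩ := hq
      have hiff := hL.2 a.1 m hmlt
      have hcond : (PySem.Set.contains a.2 a.1 = true) ↔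
          (last.contains b.1 = true ∧ b.2 ≤ last.getD b.1 0) := by
        rw [PySem.Set.contains_iff, hmem, ← hab, hbm]
        exact hiff.symm
      unfold aCount bCount
      by_cases hcs : PySem.Set.contains a.2 a.1 = true
      · rw [if_pos hcs, if_pos (hcond.mp hcs)]
      · rw [if_neg hcs, if_neg (fun hh => hcs (hcond.mpr hh))]
    rw [hstep]
    exact ih _

theorem linv_step (xs : List Int) (num : Int) (last : PySem.Dict Int Int)
    (h : LInv xs last) : LInv (xs ++ [num]) (last.insert num (xs.length : Int)) := by
  obtain ⟨h1, h2⟩ := h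
  constructor
  · intro v hv
    by_cases hvn : v = num
    · subst hvn
      refine ⟨xs.length, ?_, by simp⟩
      rw [PySem.Dict.get?_insert_self]
    · rw [PySem.Dict.contains_insert] at hv
      simp [hvn] at hv
      obtain ⟨j, hj, hjlt⟩ := h1 v hv
      have hl : (xs ++ [num]).length = xs.length + 1 := by simp
      refine ⟨j, ?_, by omega⟩
      rw [PySem.Dict.get?_insert_of_ne _ _ hvn]
      exact hj
  · intro v m hm
    simp only [List.length_append, List.length_cons, List.length_nil] at hm
    have hdrop : (xs ++ [num]).drop m = xs.drop m ++ [num] :=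
      List.drop_append_of_le_length (by omega)
    by_cases hvn : v = num
    · subst hvn
      constructor
      · intro _; rw [hdrop]; simp
      · intro _
        refine ⟨PySem.Dict.contains_insert_self _ _ _, ?_⟩
        rw [PySem.Dict.getD_insert_self]
        omega
    · have hc : (last.insert num (xs.length : Int)).contains v = last.contains v := by
        rw [PySem.Dict.contains_insert]
        simp [hvn]
      have hg : (last.insert num (xs.length : Int)).getD v 0 = last.getD v 0 :=
        PySem.Dict.getD_insert_of_ne _ _ _ hvn
      rw [hdrop, hc, hg]
      have hmem : (v ∈ xs.drop m ++ [num]) ↔ v ∈ xs.drop m := by simp [hvn]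
      rw [hmem]
      by_cases hmlt : m < xs.length
      · exact h2 v m hmlt
      · have hme : m = xs.length := by omega
        subst hme
        simp only [List.drop_length]
        constructor
        · rintro ⟨hcv, hle⟩
          obtain ⟨j, hj, hjlt⟩ := h1 v hcv
          have hgd : last.getD v 0 = (j : Int) := PySem.Dict.getD_of_get?_eq_some _ _ hj
          rw [hgd] at hle
          have : (xs.length : Int) ≤ (j : Int) := hle
          omega
        · intro hfalse; simp at hfalse

theorem main_lemma :
    ∀ (rest xs : List Int) (r : Int) (dA : PySem.Dict Int (PySem.Set Int))
      (dB last : PySem.Dict Int Int),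
      RelD xs dA dB → LInv xs last →
      (rest.foldl aStep (r, dA)).1 =
        ((PySem.List.enumerate rest (xs.length : Int)).foldl bStep (r, dB, last)).1 := by
  intro rest
  induction rest with
  | nil => intro xs r dA dB last _ _; rw [PySem.List.enumerate_nil]; rfl
  | cons num rest ih =>
    intro xs r dA dB last hR hL
    rw [PySem.List.enumerate_cons]
    simp only [List.foldl_cons]
    have hce : (PySem.Dict.empty : PySem.Dict Int (PySem.Set Int)).contains num = false := rfl
    have hce' : (PySem.Dict.empty : PySem.Dict Int Int).contains num = false := rfl
    have hcurr0 : RelD (xs ++ [num])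
        (PySem.Dict.insert PySem.Dict.empty num (PySem.Set.add PySem.Set.empty num))
        (PySem.Dict.insert PySem.Dict.empty num (xs.length : Int)) := by
      constructor
      · rw [PySem.Dict.keys_insert_of_not_contains _ _ hce]
        have he0 : (PySem.Dict.empty : PySem.Dict Int (PySem.Set Int)).keys = [] := rfl
        rw [he0]
        simp
      · rw [PySem.Dict.items_insert_of_not_contains _ _ hce,
          PySem.Dict.items_insert_of_not_contains _ _ hce']
        refine List.Forall₂.cons ⟨rfl, xs.length, rfl, by simp, ?_⟩ List.Forall₂.nil
        intro x
        rw [PySem.Set.mem_add]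
        simp [PySem.Set.empty]
    have hR' := inner_loop xs num dA.items dB.items hR.2 _ _ hcurr0
    have hL' := linv_step xs num last hL
    have hcnt := count_eq (xs ++ [num]) (last.insert num (xs.length : Int)) hL' _ _ hR'.2 r
    have hlen : (((xs ++ [num]).length : Nat) : Int) = (xs.length : Int) + 1 := by
      simp
    have hstepA : aStep (r, dA) num =
        ((dA.items.foldl (aInner num)
            (PySem.Dict.insert PySem.Dict.empty num (PySem.Set.add PySem.Set.empty num))).items.foldl
            aCount r,
         dA.items.foldl (aInner num)
            (PySem.Dict.insert PySem.Dict.empty num (PySem.Set.add PySem.Set.empty num))) := rfl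
    have hstepB : bStep (r, dB, last) ((xs.length : Int), num) =
        ((dB.items.foldl (bInner num)
            (PySem.Dict.insert PySem.Dict.empty num (xs.length : Int))).items.foldl
            (bCount (last.insert num (xs.length : Int))) r,
         dB.items.foldl (bInner num) (PySem.Dict.insert PySem.Dict.empty num (xs.length : Int)),
         last.insert num (xs.length : Int)) := rfl
    rw [hstepA, hstepB, ← hcnt, ← hlen]
    exact ih (xs ++ [num]) _ _ _ _ hR' hL'

-- ===== VERDICT (by name: the statement is the Claim_ definition above) =====
theorem count_valid_subarrays_spec : Claim_equal_count_valid_subarrays := by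
  intro arr _
  unfold Spec_count_valid_subarrays count_valid_subarrays count_valid_subarrays_alt
  have hR0 : RelD [] PySem.Dict.empty PySem.Dict.empty := ⟨List.nodup_nil, List.Forall₂.nil⟩
  have hL0 : LInv [] PySem.Dict.empty := by
    constructor
    · intro v hv; exact absurd hv (by simp [PySem.Dict.contains_empty])
    · intro v m hm; simp at hm
  have h := main_lemma arr [] 0 PySem.Dict.empty PySem.Dict.empty PySem.Dict.empty hR0 hL0
  simpa using h
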